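-- pv_equiv track=rewrite | github.com/uppeabhishek/problem-solving | 1101-the-earliest-moment-when-everyone-become-friends/1101-the-earliest-moment-when-everyone-become-friends.py | earliestAcq
-- ===== SOURCE A (Python) =====
-- from typing import List
--
-- class Graph:
--
--     def __init__(self, n):
--         self.root = [i for i in range(n)]
--         self.rank = [1] * n
--         self.cnt = n
--
--     def find(self, x):
--         if self.root[x] == x:
--             return x
--
--         self.root[x] = self.find(self.root[x])
--         return self.root[x]
--
--     def union(self, x, y):
--         x, y = self.find(x), self.find(y)
--
--         if x != y:
--             if self.rank[x] == self.rank[y]: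
--                 self.root[y] = self.root[x]
--                 self.rank[x] += 1
--             elif self.rank[x] > self.rank[y]:
--                 self.root[y] = x
--             else:
--                 self.root[x] = y
--
--             self.cnt -= 1
--             return True
--
--         return False
--
--     def getCount(self):
--         return self.cnt
--
-- def earliestAcq(logs: List[List[int]], n: int) -> int:
--
--     g = Graph(n)
--
--     result = 0
--
--     logs.sort(key = lambda k: k[0])
--
--     for timestamp, x, y in logs:
--         if g.union(x, y):
--             result = timestamp
--
--     return result if g.getCount() == 1 else -1
-- ===== SOURCE B (Python) =====
-- def earliestAcq(logs, n):
--     logs.sort(key=lambda k: k[0])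
--     comp = list(range(n))
--     cnt = n
--     result = 0
--     for t, x, y in logs:
--         cx, cy = comp[x], comp[y]
--         if cx != cy:
--             comp = [cx if c == cy else c for c in comp]
--             cnt -= 1
--             result = t
--     return result if cnt == 1 else -1
-- ===== Notes on version B (the rewrite author's own statement) =====
-- stated objective: simpler
-- what changed: Replaces the union-find class (parent/rank arrays, recursive find with path compression) by a flat component-label list: each node carries its component label and a merge relabels every node of one component in a single comprehension, with no find, no rank and no recursion.
import Mathlib
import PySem

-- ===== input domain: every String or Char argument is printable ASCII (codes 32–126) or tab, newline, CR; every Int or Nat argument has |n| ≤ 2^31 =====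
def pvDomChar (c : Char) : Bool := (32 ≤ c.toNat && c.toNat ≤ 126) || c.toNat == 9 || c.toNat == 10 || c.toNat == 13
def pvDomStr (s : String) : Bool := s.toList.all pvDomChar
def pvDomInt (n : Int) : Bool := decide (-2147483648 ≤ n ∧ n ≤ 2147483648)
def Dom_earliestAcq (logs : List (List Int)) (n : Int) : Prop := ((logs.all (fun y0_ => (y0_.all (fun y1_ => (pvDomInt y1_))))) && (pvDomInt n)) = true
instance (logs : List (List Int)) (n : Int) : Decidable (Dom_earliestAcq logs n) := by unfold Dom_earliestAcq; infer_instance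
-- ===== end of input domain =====

-- B replaces A's union-find class by a flat component-label list (merge = relabel), for simplicity;
-- both A and B sort `logs` in place (argument mutation identical); the theorems are about the return value.

-- ===== PORT A =====
-- Graph.find: recursive with path compression; `fuel` is a totality guard only (Python's
-- recursion is unguarded); under Pre_ the fuel root.length+1 is proved sufficient.
def findA : Nat → List Int → Int → Option (List Int × Int)
  | 0, _, _ => none
  | fuel+1, root, x =>
    match PySem.List.pyGet? root x with
    | none => none
    | some p =>
      if p = x then some (root, x)
      else
        match findA fuel root p with
        | none => none
        | some (root1, r) =>
          match PySem.List.pySet? root1 x r with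
          | none => none
          | some root2 => some (root2, r)

-- Graph.union on the state (root, rank, cnt); returns the new state and the Bool Python returns.
def unionA (root rank : List Int) (cnt : Int) (x y : Int) :
    Option (List Int × List Int × Int × Bool) :=
  match findA (root.length + 1) root x with
  | none => none
  | some (root1, rx) =>
    match findA (root1.length + 1) root1 y with
    | none => none
    | some (root2, ry) =>
      if rx ≠ ry then
        match PySem.List.pyGet? rank rx, PySem.List.pyGet? rank ry with
        | some kx, some ky =>
          if kx = ky then
            match PySem.List.pyGet? root2 rx with
            | none => none
            | some v =>
              match PySem.List.pySet? root2 ry v, PySem.List.pySet? rank rx (kx + 1) with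
              | some root3, some rank3 => some (root3, rank3, cnt - 1, true)
              | _, _ => none
          else if kx > ky then
            match PySem.List.pySet? root2 ry rx with
            | some root3 => some (root3, rank, cnt - 1, true)
            | none => none
          else
            match PySem.List.pySet? root2 rx ry with
            | some root3 => some (root3, rank, cnt - 1, true)
            | none => none
        | _, _ => none
      else some (root2, rank, cnt, false)

-- the body of A's for-loop (state: root, rank, cnt, result; none = a raised exception)
def stepA (st : Option (List Int × List Int × Int × Int)) (l : List Int) :
    Option (List Int × List Int × Int × Int) :=
  match st with
  | none => none
  | some (root, rank, cnt, result) =>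
    match l with
    | [t, x, y] =>
      match unionA root rank cnt x y with
      | none => none
      | some (root', rank', cnt', b) => some (root', rank', cnt', if b then t else result)
    | _ => none  -- tuple unpack of a row that is not [t, x, y] raises ValueError

def earliestAcq (logs : List (List Int)) (n : Int) : Int :=
  let root := PySem.List.pyRange 0 n 1           -- [i for i in range(n)]
  let rank := List.replicate n.toNat 1           -- [1] * n
  -- logs.sort(key=lambda k: k[0]); k[0] raises on a row of length 0 — total key via getD, exact under Pre_
  let s := PySem.List.sorted logs (fun k => PySem.List.pyGetD k 0 0) false
  match s.foldl stepA (some (root, rank, n, 0)) with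
  | none => 0
  | some (_, _, cnt, result) => if cnt = 1 then result else -1

-- ===== PORT B =====
-- the body of B's for-loop (state: comp, cnt, result)
def stepB (st : Option (List Int × Int × Int)) (l : List Int) :
    Option (List Int × Int × Int) :=
  match st with
  | none => none
  | some (comp, cnt, result) =>
    match l with
    | [t, x, y] =>
      match PySem.List.pyGet? comp x, PySem.List.pyGet? comp y with
      | some cx, some cy =>
        if cx ≠ cy then some (comp.map (fun c => if c = cy then cx else c), cnt - 1, t)
        else some (comp, cnt, result)
      | _, _ => none
    | _ => none

def earliestAcq_alt (logs : List (List Int)) (n : Int) : Int :=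
  let s := PySem.List.sorted logs (fun k => PySem.List.pyGetD k 0 0) false
  match s.foldl stepB (some (PySem.List.pyRange 0 n 1, n, 0)) with
  | none => -1
  | some (_, cnt, result) => if cnt = 1 then result else -1

-- ===== PRECONDITION & SPEC =====
-- Pre_ admits exactly the inputs on which the Python A returns: every row is [t, x, y] with
-- -n ≤ x, y < n (Python list indexing accepts negative indices down to -n); a row of another
-- arity makes A raise ValueError, an index outside [-n, n) IndexError.
def Pre_earliestAcq (logs : List (List Int)) (n : Int) : Prop :=
  ∀ l ∈ logs, l.length = 3 ∧ -n ≤ l.getD 1 0 ∧ l.getD 1 0 < n ∧ -n ≤ l.getD 2 0 ∧ l.getD 2 0 < n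
instance (logs : List (List Int)) (n : Int) : Decidable (Pre_earliestAcq logs n) := by
  unfold Pre_earliestAcq; infer_instance

def pvWitness_earliestAcq : List (List Int) × Int := ([[4, 0, 1], [2, 1, 2], [7, 0, 2]], 3)

def Spec_earliestAcq (logs : List (List Int)) (n : Int) (out : Int) : Prop := out = earliestAcq_alt logs n
instance (logs : List (List Int)) (n : Int) (out : Int) : Decidable (Spec_earliestAcq logs n out) := by unfold Spec_earliestAcq; infer_instance

-- ===== CLAIM (what is proved, stated in full; the proofs are below) =====
def Claim_equal_earliestAcq : Prop := ∀ (logs : List (List Int)) (n : Int), Dom_earliestAcq logs n → Pre_earliestAcq logs n → Spec_earliestAcq logs n (earliestAcq logs n)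

-- ===== LEMMAS AND PROOFS =====

-- total read of xs[i] (only ever used with 0 ≤ i < xs.length)
def gv (xs : List Int) (i : Int) : Int := PySem.List.pyGetD xs i 0

-- union-find invariant of A's (root, rank) state
def RootInv (n : Int) (root rank : List Int) : Prop :=
  root.length = n.toNat ∧ rank.length = n.toNat ∧
  (∀ i : Int, 0 ≤ i → i < n → 0 ≤ gv root i ∧ gv root i < n) ∧
  (∀ i : Int, 0 ≤ i → i < n → 1 ≤ gv rank i) ∧
  (∀ i : Int, 0 ≤ i → i < n → gv root i ≠ i → gv rank i < gv rank (gv root i))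

-- the label list comp names exactly the components of the forest root
def CompLabel (n : Int) (root comp : List Int) : Prop :=
  comp.length = n.toNat ∧
  (∀ i : Int, 0 ≤ i → i < n → gv comp (gv root i) = gv comp i) ∧
  (∀ i j : Int, 0 ≤ i → i < n → 0 ≤ j → j < n →
    gv root i = i → gv root j = j → gv comp i = gv comp j → i = j)

-- number of union-find roots
def rootsCnt (n : Int) (root : List Int) : Int :=
  (((PySem.List.pyRange 0 n 1).filter (fun i => gv root i == i)).length : Int)

-- rank bound that keeps find's fuel sufficient
def RankBound (n : Int) (rank : List Int) (cnt : Int) : Prop :=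
  ∀ i : Int, 0 ≤ i → i < n → gv rank i + cnt ≤ n + 1

lemma pyGet?_in_range (xs : List Int) (i : Int) (h0 : 0 ≤ i) (h1 : i < xs.length) :
    PySem.List.pyGet? xs i = some (gv xs i) := by
  obtain ⟨k, rfl⟩ := Int.eq_ofNat_of_zero_le h0
  have hk : k < xs.length := by exact_mod_cast h1
  simp [gv, PySem.List.pyGet?_natCast, PySem.List.pyGetD_natCast, List.getElem?_eq_getElem hk]

lemma pySet?_in_range (xs : List Int) (i : Int) (v : Int) (h0 : 0 ≤ i) (h1 : i < xs.length) :
    PySem.List.pySet? xs i v = some (PySem.List.pySetD xs i v) := by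
  obtain ⟨k, rfl⟩ := Int.eq_ofNat_of_zero_le h0
  have hk : k < xs.length := by exact_mod_cast h1
  rw [PySem.List.pySet?_natCast _ _ _ hk]
  simp [PySem.List.pySetD_natCast]

lemma gv_pySetD (xs : List Int) (i v j : Int) (hi0 : 0 ≤ i) (hi1 : i < xs.length)
    (hj0 : 0 ≤ j) (hj1 : j < xs.length) :
    gv (PySem.List.pySetD xs i v) j = if j = i then v else gv xs j := by
  obtain ⟨k, rfl⟩ := Int.eq_ofNat_of_zero_le hi0
  obtain ⟨m, rfl⟩ := Int.eq_ofNat_of_zero_le hj0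
  have hk : k < xs.length := by exact_mod_cast hi1
  unfold gv
  rw [PySem.List.pyGetD_pySetD_natCast _ _ _ _ _ hk]
  by_cases h : m = k
  · simp [h]
  · have h' : ¬ ((m:Int) = k) := by exact_mod_cast h
    simp [h, h']

lemma length_pySetD' (xs : List Int) (i v : Int) :
    (PySem.List.pySetD xs i v).length = xs.length := by
  exact PySem.List.length_pySetD xs i v

lemma gv_map (f : Int → Int) (xs : List Int) (j : Int) (hj0 : 0 ≤ j) (hj1 : j < xs.length) :
    gv (xs.map f) j = f (gv xs j) := by
  obtain ⟨m, rfl⟩ := Int.eq_ofNat_of_zero_le hj0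
  have hm : m < xs.length := by exact_mod_cast hj1
  unfold gv
  rw [PySem.List.pyGetD_natCast, PySem.List.pyGetD_natCast]
  simp [List.getD_eq_getElem?_getD, hm]

lemma gv_pyRange (n i : Int) (h0 : 0 ≤ i) (h1 : i < n) :
    gv (PySem.List.pyRange 0 n 1) i = i := by
  have := PySem.List.pyGetD_map_pyRange_of_nonneg (fun x => x) n i 0 h0 h1
  simpa [gv] using this

lemma gv_replicate (n : Int) (i : Int) (h0 : 0 ≤ i) (h1 : i < n) :
    gv (List.replicate n.toNat 1) i = 1 := by
  obtain ⟨m, rfl⟩ := Int.eq_ofNat_of_zero_le h0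
  have hm : m < n.toNat := by omega
  unfold gv
  rw [PySem.List.pyGetD_natCast]
  simp [List.getD_eq_getElem?_getD, hm]

lemma rootsCnt_congr (n : Int) (r1 r2 : List Int)
    (h : ∀ i : Int, 0 ≤ i → i < n → (gv r1 i = i ↔ gv r2 i = i)) :
    rootsCnt n r1 = rootsCnt n r2 := by
  unfold rootsCnt
  congr 1
  apply congrArg
  apply List.filter_congr
  intro i hi
  rw [PySem.List.mem_pyRange_one] at hi
  have := h i hi.1 hi.2
  by_cases h1 : gv r1 i = i
  · simp [h1, (this.mp h1)]
  · have h2 : ¬ gv r2 i = i := fun hh => h1 (this.mpr hh)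
    simp [h1, h2]

lemma rootsCnt_pos (n : Int) (root rank : List Int) (hn : 1 ≤ n) (hR : RootInv n root rank) :
    1 ≤ rootsCnt n root := by
  unfold rootsCnt
  have hne : PySem.List.pyRange 0 n 1 ≠ [] := by
    intro h
    have hl := PySem.List.length_pyRange_one 0 n
    rw [h] at hl
    simp at hl
    omega
  obtain ⟨m, hm⟩ : ∃ m, (PySem.List.pyRange 0 n 1).argmax (gv rank) = some m := by
    cases h : (PySem.List.pyRange 0 n 1).argmax (gv rank) with
    | none => exact absurd (List.argmax_eq_none.mp h) hne
    | some m => exact ⟨m, rfl⟩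
  have hmmem := List.argmax_mem hm
  have hmb := PySem.List.mem_pyRange_one.mp hmmem
  have hroot : gv root m = m := by
    by_contra hnr
    have h1 := hR.2.2.2.2 m hmb.1 hmb.2 hnr
    have hb := hR.2.2.1 m hmb.1 hmb.2
    have hmem2 : gv root m ∈ PySem.List.pyRange 0 n 1 :=
      PySem.List.mem_pyRange_one.mpr ⟨hb.1, hb.2⟩
    have := List.le_of_mem_argmax hmem2 hm
    omega
  have hmf : m ∈ (PySem.List.pyRange 0 n 1).filter (fun i => gv root i == i) :=
    List.mem_filter.mpr ⟨hmmem, by simp [hroot]⟩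
  have := List.length_pos_of_mem hmf
  omega

lemma rootsCnt_set_nonroot (n : Int) (root : List Int) (ry v : Int)
    (hlen : root.length = n.toNat) (h0 : 0 ≤ ry) (h1 : ry < n)
    (hroot : gv root ry = ry) (hv : v ≠ ry) :
    rootsCnt n (PySem.List.pySetD root ry v) = rootsCnt n root - 1 := by
  have hlen' : (ry : Int) < (root.length : Int) := by omega
  unfold rootsCnt
  rw [PySem.List.pyRange_one_append 0 ry n h0 (le_of_lt h1), PySem.List.pyRange_one_cons h1]
  have hcongr : ∀ j : Int, 0 ≤ j → j < n → j ≠ ry →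
      (gv (PySem.List.pySetD root ry v) j == j) = (gv root j == j) := by
    intro j hj0 hj1 hne
    rw [gv_pySetD root ry v j h0 hlen' hj0 (by omega)]
    simp [hne]
  have h2 : (List.filter (fun i => gv (PySem.List.pySetD root ry v) i == i) (PySem.List.pyRange 0 ry 1))
      = List.filter (fun i => gv root i == i) (PySem.List.pyRange 0 ry 1) := by
    apply List.filter_congr
    intro j hj
    have hb := PySem.List.mem_pyRange_one.mp hj
    exact hcongr j hb.1 (by omega) (by omega)
  have h3 : (List.filter (fun i => gv (PySem.List.pySetD root ry v) i == i) (PySem.List.pyRange (ry+1) n 1))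
      = List.filter (fun i => gv root i == i) (PySem.List.pyRange (ry+1) n 1) := by
    apply List.filter_congr
    intro j hj
    have hb := PySem.List.mem_pyRange_one.mp hj
    exact hcongr j (by omega) hb.2 (by omega)
  have h4 : gv (PySem.List.pySetD root ry v) ry = v :=
    by rw [gv_pySetD root ry v ry h0 hlen' h0 hlen']; simp
  simp only [List.filter_append, List.filter_cons, h2, h3, h4, hroot]
  have hvne : (v == ry) = false := by simp [hv]
  simp [hvne]
  omega

lemma findA_spec (n : Int) (rank comp : List Int)
    (hub : ∀ i : Int, 0 ≤ i → i < n → gv rank i ≤ n) :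
    ∀ (f : Nat) (root : List Int) (x : Int), RootInv n root rank → CompLabel n root comp →
    0 ≤ x → x < n → n + 1 - gv rank x ≤ (f : Int) →
    ∃ root' r, findA f root x = some (root', r) ∧
      0 ≤ r ∧ r < n ∧ gv root r = r ∧ gv rank x ≤ gv rank r ∧ gv comp r = gv comp x ∧
      RootInv n root' rank ∧ CompLabel n root' comp ∧
      (∀ i : Int, 0 ≤ i → i < n → (gv root' i = i ↔ gv root i = i)) := by
  intro f
  induction f with
  | zero =>
    intro root x hR hC hx0 hx1 hf
    have := hub x hx0 hx1
    simp at hf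
    omega
  | succ f ih =>
    intro root x hR hC hx0 hx1 hf
    obtain ⟨hlr, hlk, hbnd, hklo, hord⟩ := hR
    have hxlen : x < (root.length : Int) := by omega
    have e1 : PySem.List.pyGet? root x = some (gv root x) := pyGet?_in_range root x hx0 hxlen
    by_cases hpx : gv root x = x
    · refine ⟨root, x, ?_, hx0, hx1, hpx, le_refl _, rfl, ⟨hlr, hlk, hbnd, hklo, hord⟩, hC, fun i _ _ => Iff.rfl⟩
      simp only [findA, e1]
      simp [hpx]
    · have hp0 : 0 ≤ gv root x := (hbnd x hx0 hx1).1
      have hp1 : gv root x < n := (hbnd x hx0 hx1).2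
      have hkx : gv rank x < gv rank (gv root x) := hord x hx0 hx1 hpx
      have hf' : n + 1 - gv rank (gv root x) ≤ (f : Int) := by push_cast at hf ⊢; omega
      obtain ⟨root1, r, heq, hr0, hr1, hrroot, hrrank, hrcomp, hR1, hC1, hiff⟩ :=
        ih root (gv root x) ⟨hlr, hlk, hbnd, hklo, hord⟩ hC hp0 hp1 hf'
      have hl1 : root1.length = n.toNat := hR1.1
      have hxlen1 : x < (root1.length : Int) := by omega
      have e2 : PySem.List.pySet? root1 x r = some (PySem.List.pySetD root1 x r) :=
        pySet?_in_range root1 x r hx0 hxlen1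
      have hrx : r ≠ x := fun h => hpx (h ▸ hrroot)
      have hgv2 : ∀ j : Int, 0 ≤ j → j < n →
          gv (PySem.List.pySetD root1 x r) j = if j = x then r else gv root1 j := by
        intro j hj0 hj1
        exact gv_pySetD root1 x r j hx0 hxlen1 hj0 (by omega)
      refine ⟨PySem.List.pySetD root1 x r, r, ?_, hr0, hr1, hrroot, by omega,
        by rw [hrcomp, hC.2.1 x hx0 hx1], ?_, ?_, ?_⟩
      · simp only [findA, e1, if_neg hpx, heq, e2]
      · -- RootInv for root2
        refine ⟨by rw [length_pySetD']; exact hl1, hlk, ?_, hklo, ?_⟩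
        · intro i hi0 hi1
          rw [hgv2 i hi0 hi1]
          split
          · exact ⟨hr0, hr1⟩
          · exact hR1.2.2.1 i hi0 hi1
        · intro i hi0 hi1 hnr
          rw [hgv2 i hi0 hi1] at hnr ⊢
          by_cases hix : i = x
          · subst hix
            rw [if_pos rfl] at hnr ⊢
            omega
          · simp only [if_neg hix] at hnr ⊢
            exact hR1.2.2.2.2 i hi0 hi1 hnr
      · -- CompLabel for root2
        refine ⟨hC1.1, ?_, ?_⟩
        · intro i hi0 hi1
          rw [hgv2 i hi0 hi1]
          split
          · rename_i h; subst h
            rw [hrcomp, hC.2.1 i hi0 hi1]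
          · exact hC1.2.1 i hi0 hi1
        · intro i j hi0 hi1 hj0 hj1 hri hrj hcij
          rw [hgv2 i hi0 hi1] at hri
          rw [hgv2 j hj0 hj1] at hrj
          by_cases hix : i = x
          · subst hix; rw [if_pos rfl] at hri; exact absurd hri hrx
          · by_cases hjx : j = x
            · subst hjx; rw [if_pos rfl] at hrj; exact absurd hrj hrx
            · simp only [if_neg hix] at hri
              simp only [if_neg hjx] at hrj
              exact hC1.2.2 i j hi0 hi1 hj0 hj1 hri hrj hcij
      · intro i hi0 hi1
        rw [hgv2 i hi0 hi1]
        by_cases hix : i = x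
        · subst hix
          rw [if_pos rfl]
          constructor
          · intro h; exact absurd h hrx
          · intro h; exact absurd h hpx
        · simp only [if_neg hix]
          exact hiff i hi0 hi1

lemma merge_invs (n : Int) (root2 rank rank' comp : List Int) (l w cx cy : Int)
    (hR2 : RootInv n root2 rank) (hC2 : CompLabel n root2 comp)
    (hl0 : 0 ≤ l) (hl1 : l < n) (hw0 : 0 ≤ w) (hw1 : w < n) (hlw : l ≠ w)
    (hlroot : gv root2 l = l)
    (hcxcy : cx ≠ cy)
    (hlab : (gv comp l = cx ∧ gv comp w = cy) ∨ (gv comp l = cy ∧ gv comp w = cx))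
    (hklen : rank'.length = n.toNat)
    (hmono : ∀ i : Int, 0 ≤ i → i < n → gv rank i ≤ gv rank' i)
    (hkeq : ∀ i : Int, 0 ≤ i → i < n → gv root2 i ≠ i → gv rank' i = gv rank i)
    (hlt : gv rank' l < gv rank' w) :
    RootInv n (PySem.List.pySetD root2 l w) rank' ∧
    CompLabel n (PySem.List.pySetD root2 l w) (comp.map (fun c => if c = cy then cx else c)) := by
  obtain ⟨hlr, hlk, hbnd, hklo, hord⟩ := hR2
  obtain ⟨hlc, hchain, hinj⟩ := hC2
  have hllen : l < (root2.length : Int) := by omega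
  have hgv3 : ∀ j : Int, 0 ≤ j → j < n →
      gv (PySem.List.pySetD root2 l w) j = if j = l then w else gv root2 j := by
    intro j hj0 hj1
    exact gv_pySetD root2 l w j hl0 hllen hj0 (by omega)
  have hcm : ∀ j : Int, 0 ≤ j → j < n →
      gv (comp.map (fun c => if c = cy then cx else c)) j
        = (if gv comp j = cy then cx else gv comp j) := by
    intro j hj0 hj1
    exact gv_map (fun c => if c = cy then cx else c) comp j hj0 (by omega)
  have hfcx : (if cx = cy then cx else cx) = cx := by simp
  constructor
  · refine ⟨by rw [length_pySetD']; exact hlr, hklen, ?_, ?_, ?_⟩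
    · intro i hi0 hi1
      rw [hgv3 i hi0 hi1]
      split
      · exact ⟨hw0, hw1⟩
      · exact hbnd i hi0 hi1
    · intro i hi0 hi1
      have := hklo i hi0 hi1
      have := hmono i hi0 hi1
      omega
    · intro i hi0 hi1 hnr
      rw [hgv3 i hi0 hi1] at hnr ⊢
      by_cases hil : i = l
      · subst hil
        rw [if_pos rfl] at hnr ⊢
        exact hlt
      · rw [if_neg hil] at hnr ⊢
        have hp0 := (hbnd i hi0 hi1).1
        have hp1 := (hbnd i hi0 hi1).2
        have h1 := hord i hi0 hi1 hnr
        have h2 := hkeq i hi0 hi1 hnr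
        have h3 := hmono (gv root2 i) hp0 hp1
        omega
  · refine ⟨by simp [hlc], ?_, ?_⟩
    · intro i hi0 hi1
      have hp0 := (hbnd i hi0 hi1).1
      have hp1 := (hbnd i hi0 hi1).2
      rw [hgv3 i hi0 hi1]
      by_cases hil : i = l
      · rw [if_pos hil, hil, hcm w hw0 hw1, hcm l hl0 hl1]
        rcases hlab with ⟨h1, h2⟩ | ⟨h1, h2⟩
        · rw [h1, h2]
          simp [hcxcy]
        · rw [h1, h2]
          simp [hcxcy]
      · rw [if_neg hil, hcm (gv root2 i) hp0 hp1, hcm i hi0 hi1, hchain i hi0 hi1]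
    · intro i j hi0 hi1 hj0 hj1 hri hrj hcij
      rw [hgv3 i hi0 hi1] at hri
      rw [hgv3 j hj0 hj1] at hrj
      by_cases hil : i = l
      · subst hil; rw [if_pos rfl] at hri; exact absurd hri.symm hlw
      · by_cases hjl : j = l
        · subst hjl; rw [if_pos rfl] at hrj; exact absurd hrj.symm hlw
        · rw [if_neg hil] at hri
          rw [if_neg hjl] at hrj
          rw [hcm i hi0 hi1, hcm j hj0 hj1] at hcij
          -- the label of the loser l
          have hcl : gv comp l = cx ∨ gv comp l = cy := by
            rcases hlab with ⟨h1, _⟩ | ⟨h1, _⟩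
            · exact Or.inl h1
            · exact Or.inr h1
          have hkey : gv comp i = gv comp j := by
            by_cases h1 : gv comp i = cy <;> by_cases h2 : gv comp j = cy
            · rw [h1, h2]
            · rw [if_pos h1, if_neg h2] at hcij
              rcases hlab with ⟨hlcx, hwcy⟩ | ⟨hlcy, hwcx⟩
              · exact absurd (hinj j l hj0 hj1 hl0 hl1 hrj hlroot (hcij.symm.trans hlcx.symm)) hjl
              · exact absurd (hinj i l hi0 hi1 hl0 hl1 hri hlroot (h1.trans hlcy.symm)) hil
            · rw [if_neg h1, if_pos h2] at hcij
              rcases hlab with ⟨hlcx, hwcy⟩ | ⟨hlcy, hwcx⟩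
              · exact absurd (hinj i l hi0 hi1 hl0 hl1 hri hlroot (hcij.trans hlcx.symm)) hil
              · exact absurd (hinj j l hj0 hj1 hl0 hl1 hrj hlroot (h2.trans hlcy.symm)) hjl
            · rw [if_neg h1, if_neg h2] at hcij
              exact hcij
          exact hinj i j hi0 hi1 hj0 hj1 hri hrj hkey

lemma unionA_spec (n : Int) (root rank comp : List Int) (cnt x y : Int)
    (hn : 1 ≤ n) (hR : RootInv n root rank) (hC : CompLabel n root comp)
    (hcnt : cnt = rootsCnt n root) (hB : RankBound n rank cnt)
    (hx0 : 0 ≤ x) (hx1 : x < n) (hy0 : 0 ≤ y) (hy1 : y < n) :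
    ∃ root' rank' cnt' b, unionA root rank cnt x y = some (root', rank', cnt', b) ∧
      (b = true ↔ gv comp x ≠ gv comp y) ∧
      (if b then
        cnt' = cnt - 1 ∧ RootInv n root' rank' ∧
        CompLabel n root' (comp.map (fun c => if c = gv comp y then gv comp x else c)) ∧
        cnt' = rootsCnt n root' ∧ RankBound n rank' cnt'
      else
        cnt' = cnt ∧ rank' = rank ∧ RootInv n root' rank' ∧ CompLabel n root' comp ∧
        cnt' = rootsCnt n root' ∧ RankBound n rank' cnt') := by
  have hcnt1 : 1 ≤ cnt := hcnt ▸ rootsCnt_pos n root rank hn hR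
  have hub : ∀ i : Int, 0 ≤ i → i < n → gv rank i ≤ n := by
    intro i h0 h1; have := hB i h0 h1; omega
  have hf1 : n + 1 - gv rank x ≤ ((root.length + 1 : Nat) : Int) := by
    have := hR.1
    have := hR.2.2.2.1 x hx0 hx1
    push_cast
    omega
  obtain ⟨root1, rx, he1, hrx0, hrx1, hrxroot, _, hrxcomp, hR1, hC1, hiff1⟩ :=
    findA_spec n rank comp hub (root.length + 1) root x hR hC hx0 hx1 hf1
  have hf2 : n + 1 - gv rank y ≤ ((root1.length + 1 : Nat) : Int) := by
    have := hR1.1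
    have := hR.2.2.2.1 y hy0 hy1
    push_cast
    omega
  obtain ⟨root2, ry, he2, hry0, hry1, hryroot1, _, hrycomp, hR2, hC2, hiff2⟩ :=
    findA_spec n rank comp hub (root1.length + 1) root1 y hR1 hC1 hy0 hy1 hf2
  -- rx and ry are roots of root2
  have hrxroot2 : gv root2 rx = rx :=
    (hiff2 rx hrx0 hrx1).mpr ((hiff1 rx hrx0 hrx1).mpr hrxroot)
  have hryroot2 : gv root2 ry = ry := (hiff2 ry hry0 hry1).mpr hryroot1
  -- count is preserved by the two finds
  have hcnt2 : cnt = rootsCnt n root2 := by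
    rw [hcnt]
    refine (rootsCnt_congr n root2 root ?_).symm
    intro i h0 h1
    exact (hiff2 i h0 h1).trans (hiff1 i h0 h1)
  have hlr2 : root2.length = n.toNat := hR2.1
  have hlk : rank.length = n.toNat := hR.2.1
  have hkxget : PySem.List.pyGet? rank rx = some (gv rank rx) :=
    pyGet?_in_range rank rx hrx0 (by omega)
  have hkyget : PySem.List.pyGet? rank ry = some (gv rank ry) :=
    pyGet?_in_range rank ry hry0 (by omega)
  by_cases hcc : gv comp x = gv comp y
  · -- same component: the two roots coincide, union returns False
    have hrxry : rx = ry := by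
      apply hC2.2.2 rx ry hrx0 hrx1 hry0 hry1 hrxroot2 hryroot2
      rw [hrxcomp, hrycomp, hcc]
    refine ⟨root2, rank, cnt, false, ?_, by simp [hcc], ?_⟩
    · simp only [unionA, he1, he2]
      simp [hrxry]
    · simp only [Bool.false_eq_true, if_false]
      exact ⟨trivial, trivial, hR2, hC2, hcnt2, hB⟩
  · -- different components: rx ≠ ry, union merges and returns True
    have hne : rx ≠ ry := by
      intro h
      apply hcc
      rw [← hrxcomp, ← hrycomp, h]
    have hlab1 : gv comp ry = gv comp y := hrycomp
    have hrxlen : rx < (root2.length : Int) := by omega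
    have hrylen : ry < (root2.length : Int) := by omega
    have hgv2rx : PySem.List.pyGet? root2 rx = some rx := by
      rw [pyGet?_in_range root2 rx hrx0 hrxlen, hrxroot2]
    by_cases hkk : gv rank rx = gv rank ry
    · -- equal ranks: root[ry] := rx, rank[rx] += 1
      set rank3 := PySem.List.pySetD rank rx (gv rank rx + 1) with hrank3
      have hk3 : ∀ j : Int, 0 ≤ j → j < n →
          gv rank3 j = if j = rx then gv rank rx + 1 else gv rank j := by
        intro j hj0 hj1
        exact gv_pySetD rank rx _ j hrx0 (by omega) hj0 (by omega)
      have hmerge := merge_invs n root2 rank rank3 comp ry rx (gv comp x) (gv comp y)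
        hR2 hC2 hry0 hry1 hrx0 hrx1 (Ne.symm hne) hryroot2 hcc
        (Or.inr ⟨hrycomp, hrxcomp⟩)
        (by rw [hrank3, length_pySetD']; exact hlk)
        (by intro i h0 h1
            rw [hk3 i h0 h1]
            by_cases hir : i = rx
            · subst hir; rw [if_pos rfl]; omega
            · rw [if_neg hir])
        (by intro i h0 h1 hnr; rw [hk3 i h0 h1, if_neg (by rintro rfl; exact hnr hrxroot2)])
        (by rw [hk3 ry hry0 hry1, if_neg (Ne.symm hne), hk3 rx hrx0 hrx1, if_pos rfl]; omega)
      refine ⟨PySem.List.pySetD root2 ry rx, rank3, cnt - 1, true, ?_, by simp [hcc], ?_⟩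
      · simp only [unionA, he1, he2]
        rw [if_pos (by exact hne), hkxget, hkyget]
        simp only [if_pos hkk, hgv2rx,
          pySet?_in_range root2 ry rx hry0 hrylen,
          pySet?_in_range rank rx (gv rank rx + 1) hrx0 (by omega)]
        rw [hrank3]
      · rw [if_pos rfl]
        refine ⟨rfl, hmerge.1, ?_, ?_, ?_⟩
        · exact hmerge.2
        · rw [rootsCnt_set_nonroot n root2 ry rx hlr2 hry0 hry1 hryroot2 hne, ← hcnt2]
        · intro i h0 h1
          rw [hk3 i h0 h1]
          have := hB i h0 h1
          have := hB rx hrx0 hrx1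
          split <;> omega
    · by_cases hgt : gv rank rx > gv rank ry
      · -- rank rx wins: root[ry] := rx
        have hmerge := merge_invs n root2 rank rank comp ry rx (gv comp x) (gv comp y)
          hR2 hC2 hry0 hry1 hrx0 hrx1 (Ne.symm hne) hryroot2 hcc
          (Or.inr ⟨hrycomp, hrxcomp⟩) hlk
          (by intro i h0 h1; exact le_refl _)
          (by intro i h0 h1 _; rfl)
          hgt
        refine ⟨PySem.List.pySetD root2 ry rx, rank, cnt - 1, true, ?_, by simp [hcc], ?_⟩
        · simp only [unionA, he1, he2]
          rw [if_pos (by exact hne), hkxget, hkyget]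
          simp only [if_neg hkk, if_pos hgt,
            pySet?_in_range root2 ry rx hry0 hrylen]
        · rw [if_pos rfl]
          refine ⟨rfl, hmerge.1, hmerge.2, ?_, ?_⟩
          · rw [rootsCnt_set_nonroot n root2 ry rx hlr2 hry0 hry1 hryroot2 hne, ← hcnt2]
          · intro i h0 h1
            have := hB i h0 h1
            omega
      · -- rank ry wins: root[rx] := ry
        have hlt : gv rank rx < gv rank ry := by omega
        have hmerge := merge_invs n root2 rank rank comp rx ry (gv comp x) (gv comp y)
          hR2 hC2 hrx0 hrx1 hry0 hry1 hne hrxroot2 hcc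
          (Or.inl ⟨hrxcomp, hrycomp⟩) hlk
          (by intro i h0 h1; exact le_refl _)
          (by intro i h0 h1 _; rfl)
          hlt
        refine ⟨PySem.List.pySetD root2 rx ry, rank, cnt - 1, true, ?_, by simp [hcc], ?_⟩
        · simp only [unionA, he1, he2]
          rw [if_pos (by exact hne), hkxget, hkyget]
          simp only [if_neg hkk, if_neg hgt,
            pySet?_in_range root2 rx ry hrx0 hrxlen]
        · rw [if_pos rfl]
          refine ⟨rfl, hmerge.1, hmerge.2, ?_, ?_⟩
          · rw [rootsCnt_set_nonroot n root2 rx ry hlr2 hrx0 hrx1 hrxroot2 (Ne.symm hne), ← hcnt2]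
          · intro i h0 h1
            have := hB i h0 h1
            omega

lemma pyGet?_neg (xs : List Int) (i : Int) (h0 : -xs.length ≤ i) (h1 : i < 0) :
    PySem.List.pyGet? xs i = PySem.List.pyGet? xs (i + xs.length) := by
  have hnot : ¬ (0:Int) ≤ i := by omega
  have h2 : (0:Int) ≤ i + xs.length := by omega
  have h3 : i + (xs.length:Int) < xs.length := by omega
  have h4 : xs.length - (-i).toNat = (i + xs.length).toNat := by omega
  simp [PySem.List.pyGet?, PySem.List.pyIdx?, hnot, h0, h2, h3, h4]

lemma pySet?_neg (xs : List Int) (i v : Int) (h0 : -xs.length ≤ i) (h1 : i < 0) :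
    PySem.List.pySet? xs i v = PySem.List.pySet? xs (i + xs.length) v := by
  have hnot : ¬ (0:Int) ≤ i := by omega
  have h2 : (0:Int) ≤ i + xs.length := by omega
  have h3 : i + (xs.length:Int) < xs.length := by omega
  have h4 : xs.length - (-i).toNat = (i + xs.length).toNat := by omega
  simp [PySem.List.pySet?, PySem.List.pyIdx?, hnot, h0, h2, h3, h4]

lemma pySet?_some_length (xs : List Int) (i v : Int) (ys : List Int)
    (h : PySem.List.pySet? xs i v = some ys) : ys.length = xs.length := by
  have hd : PySem.List.pySetD xs i v = ys := by
    simp [PySem.List.pySetD, h]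
  rw [← hd]
  exact PySem.List.length_pySetD xs i v

lemma pySetD_gv_self (xs : List Int) (m : Int) (h0 : 0 ≤ m) (h1 : m < xs.length) :
    PySem.List.pySetD xs m (gv xs m) = xs := by
  obtain ⟨k, rfl⟩ := Int.eq_ofNat_of_zero_le h0
  have hk : k < xs.length := by exact_mod_cast h1
  unfold gv
  rw [PySem.List.pySetD_natCast, PySem.List.pyGetD_natCast, List.getD_eq_getElem _ _ hk]
  exact List.set_getElem_self hk

lemma findA_length : ∀ (f : Nat) (root : List Int) (x : Int) (root' : List Int) (r : Int),
    findA f root x = some (root', r) → root'.length = root.length := by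
  intro f
  induction f with
  | zero =>
    intro root x root' r h
    simp [findA] at h
  | succ f ih =>
    intro root x root' r h
    simp only [findA] at h
    cases hg : PySem.List.pyGet? root x with
    | none => simp only [hg] at h; exact absurd h (by simp)
    | some p =>
      simp only [hg] at h
      by_cases hpx : p = x
      · rw [if_pos hpx] at h
        simp at h
        rw [← h.1]
      · rw [if_neg hpx] at h
        cases hf : findA f root p with
        | none => simp only [hf] at h; exact absurd h (by simp)
        | some q =>
          obtain ⟨root1, r1⟩ := q
          simp only [hf] at h
          cases hs : PySem.List.pySet? root1 x r1 with
          | none => simp only [hs] at h; exact absurd h (by simp)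
          | some root2 =>
            simp only [hs] at h
            simp at h
            rw [← h.1, pySet?_some_length root1 x r1 root2 hs]
            exact ih root p root1 r1 hf

lemma findA_neg (f : Nat) (hf : 1 ≤ f) (root : List Int) (x : Int)
    (h0 : -root.length ≤ x) (h1 : x < 0)
    (hbnd : ∀ i : Int, 0 ≤ i → i < root.length → 0 ≤ gv root i) :
    findA (f + 1) root x = findA (f + 1) root (x + root.length) := by
  have hm0 : (0:Int) ≤ x + root.length := by omega
  have hm1 : x + (root.length:Int) < root.length := by omega
  have hg : PySem.List.pyGet? root x = some (gv root (x + root.length)) := by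
    rw [pyGet?_neg root x h0 h1, pyGet?_in_range root (x + root.length) hm0 hm1]
  have hgm : PySem.List.pyGet? root (x + root.length) = some (gv root (x + root.length)) :=
    pyGet?_in_range root (x + root.length) hm0 hm1
  have hp0 : 0 ≤ gv root (x + root.length) := hbnd (x + root.length) hm0 hm1
  have hpx : gv root (x + root.length) ≠ x := by omega
  obtain ⟨f, rfl⟩ : ∃ f', f = f' + 1 := ⟨f - 1, by omega⟩
  by_cases hpm : gv root (x + root.length) = x + root.length
  · have hrec : findA (f + 1) root (x + root.length) = some (root, x + root.length) := by
      rw [findA.eq_2]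
      simp only [hgm, if_pos hpm]
    rw [findA.eq_2, findA.eq_2]
    simp only [hg, hgm, if_neg hpx, if_pos hpm]
    rw [hpm, hrec]
    simp only []
    rw [pySet?_neg root x (x + root.length) h0 h1,
      pySet?_in_range root (x + root.length) (x + root.length) hm0 hm1]
    have hself := pySetD_gv_self root (x + root.length) hm0 hm1
    rw [hpm] at hself
    rw [hself]
  · rw [findA.eq_2, findA.eq_2]
    simp only [hg, hgm, if_neg hpx, if_neg hpm]
    cases hrec : findA (f + 1) root (gv root (x + root.length)) with
    | none => rfl
    | some q =>
      obtain ⟨root1, r⟩ := q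
      have hlen1 : root1.length = root.length := findA_length _ _ _ _ _ hrec
      have hx1' : -(root1.length:Int) ≤ x := by omega
      simp only []
      rw [pySet?_neg root1 x r hx1' h1, hlen1]

lemma unionA_norm (n : Int) (root rank comp : List Int) (cnt x y nx ny : Int)
    (hn : 1 ≤ n) (hR : RootInv n root rank) (hC : CompLabel n root comp)
    (hcnt : cnt = rootsCnt n root) (hB : RankBound n rank cnt)
    (hx0 : -n ≤ x) (hx1 : x < n) (hy0 : -n ≤ y) (hy1 : y < n)
    (hnxdef : nx = if 0 ≤ x then x else x + n) (hnydef : ny = if 0 ≤ y then y else y + n) :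
    unionA root rank cnt x y = unionA root rank cnt nx ny := by
  have hcnt1 : 1 ≤ cnt := hcnt ▸ rootsCnt_pos n root rank hn hR
  have hub : ∀ i : Int, 0 ≤ i → i < n → gv rank i ≤ n := by
    intro i h0 h1; have := hB i h0 h1; omega
  have hlr : root.length = n.toNat := hR.1
  have hlrI : (root.length : Int) = n := by omega
  have hnx0 : 0 ≤ nx := by rw [hnxdef]; split <;> omega
  have hnx1 : nx < n := by rw [hnxdef]; split <;> omega
  have h1 : findA (root.length + 1) root x = findA (root.length + 1) root nx := by
    by_cases hx : 0 ≤ x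
    · rw [hnxdef, if_pos hx]
    · have hb : ∀ i : Int, 0 ≤ i → i < (root.length:Int) → 0 ≤ gv root i := by
        intro i hi0 hi1
        exact (hR.2.2.1 i hi0 (by omega)).1
      have heq := findA_neg root.length (by omega) root x (by omega) (by omega) hb
      rw [hlrI] at heq
      rw [heq, hnxdef, if_neg hx]
  have hf1 : n + 1 - gv rank nx ≤ ((root.length + 1 : Nat) : Int) := by
    have := hR.2.2.2.1 nx hnx0 hnx1
    push_cast
    omega
  obtain ⟨root1, rx, he1, _, _, _, _, _, hR1, hC1, _⟩ :=
    findA_spec n rank comp hub (root.length + 1) root nx hR hC hnx0 hnx1 hf1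
  have hlr1I : (root1.length : Int) = n := by have := hR1.1; omega
  have h2 : findA (root1.length + 1) root1 y = findA (root1.length + 1) root1 ny := by
    by_cases hy : 0 ≤ y
    · rw [hnydef, if_pos hy]
    · have hb : ∀ i : Int, 0 ≤ i → i < (root1.length:Int) → 0 ≤ gv root1 i := by
        intro i hi0 hi1
        exact (hR1.2.2.1 i hi0 (by omega)).1
      have heq := findA_neg root1.length (by omega) root1 y (by omega) (by omega) hb
      rw [hlr1I] at heq
      rw [heq, hnydef, if_neg hy]
  simp only [unionA, h1, he1, h2]

lemma fold_rel (n : Int) (hn : 1 ≤ n) :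
    ∀ (s : List (List Int)) (root rank comp : List Int) (cnt res : Int),
    (∀ l ∈ s, l.length = 3 ∧ -n ≤ l.getD 1 0 ∧ l.getD 1 0 < n ∧ -n ≤ l.getD 2 0 ∧ l.getD 2 0 < n) →
    RootInv n root rank → CompLabel n root comp → cnt = rootsCnt n root → RankBound n rank cnt →
    ∃ root' rank' comp' cnt' res',
      s.foldl stepA (some (root, rank, cnt, res)) = some (root', rank', cnt', res') ∧
      s.foldl stepB (some (comp, cnt, res)) = some (comp', cnt', res') := by
  intro s
  induction s with
  | nil =>
    intro root rank comp cnt res _ _ _ _ _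
    exact ⟨root, rank, comp, cnt, res, rfl, rfl⟩
  | cons l s ih =>
    intro root rank comp cnt res hrows hR hC hcnt hB
    obtain ⟨hlen3, hx0, hx1, hy0, hy1⟩ := hrows l (by simp)
    obtain ⟨t, x, y, rfl⟩ : ∃ t x y, l = [t, x, y] := by
      match l, hlen3 with
      | [a, b, c], _ => exact ⟨a, b, c, rfl⟩
    simp [List.getD] at hx0 hx1 hy0 hy1
    set nx := if 0 ≤ x then x else x + n with hnxdef
    set ny := if 0 ≤ y then y else y + n with hnydef
    have hnx0 : 0 ≤ nx := by rw [hnxdef]; split <;> omega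
    have hnx1 : nx < n := by rw [hnxdef]; split <;> omega
    have hny0 : 0 ≤ ny := by rw [hnydef]; split <;> omega
    have hny1 : ny < n := by rw [hnydef]; split <;> omega
    have hunorm := unionA_norm n root rank comp cnt x y nx ny hn hR hC hcnt hB
      hx0 hx1 hy0 hy1 hnxdef hnydef
    obtain ⟨root2, rank2, cnt2, b, hu, hbiff, hrest⟩ :=
      unionA_spec n root rank comp cnt nx ny hn hR hC hcnt hB hnx0 hnx1 hny0 hny1
    have hcomplen : comp.length = n.toNat := hC.1
    have hclI : (comp.length : Int) = n := by omega
    have hcx : PySem.List.pyGet? comp x = some (gv comp nx) := by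
      by_cases hxs : 0 ≤ x
      · have hxx : nx = x := by rw [hnxdef, if_pos hxs]
        rw [hxx]
        exact pyGet?_in_range comp x hxs (by omega)
      · have hxx : x + (comp.length : Int) = nx := by rw [hnxdef, if_neg hxs]; omega
        rw [pyGet?_neg comp x (by omega) (by omega), hxx]
        exact pyGet?_in_range comp nx hnx0 (by omega)
    have hcy : PySem.List.pyGet? comp y = some (gv comp ny) := by
      by_cases hys : 0 ≤ y
      · have hyy : ny = y := by rw [hnydef, if_pos hys]
        rw [hyy]
        exact pyGet?_in_range comp y hys (by omega)
      · have hyy : y + (comp.length : Int) = ny := by rw [hnydef, if_neg hys]; omega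
        rw [pyGet?_neg comp y (by omega) (by omega), hyy]
        exact pyGet?_in_range comp ny hny0 (by omega)
    have hrows' := fun m hm => hrows m (List.mem_cons_of_mem _ hm)
    cases b with
    | false =>
      have hcc : gv comp nx = gv comp ny := by
        by_contra hne
        exact absurd (hbiff.mpr hne) (by simp)
      rw [if_neg (by simp)] at hrest
      obtain ⟨hc2, hk2, hR2, hC2, hcnt2', hB2⟩ := hrest
      have hA : List.foldl stepA (some (root, rank, cnt, res)) ([t, x, y] :: s)
          = List.foldl stepA (some (root2, rank2, cnt2, res)) s := by
        simp only [List.foldl_cons, stepA, hunorm, hu, Bool.false_eq_true, if_false]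
      have hBf : List.foldl stepB (some (comp, cnt, res)) ([t, x, y] :: s)
          = List.foldl stepB (some (comp, cnt2, res)) s := by
        simp only [List.foldl_cons, stepB, hcx, hcy, hc2]
        rw [if_neg (by simp [hcc])]
      rw [hA, hBf]
      exact ih root2 rank2 comp cnt2 res hrows' hR2 hC2 hcnt2' hB2
    | true =>
      have hcc : gv comp nx ≠ gv comp ny := hbiff.mp rfl
      rw [if_pos rfl] at hrest
      obtain ⟨hc2, hR2, hC2, hcnt2', hB2⟩ := hrest
      have hA : List.foldl stepA (some (root, rank, cnt, res)) ([t, x, y] :: s)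
          = List.foldl stepA (some (root2, rank2, cnt2, t)) s := by
        simp only [List.foldl_cons, stepA, hunorm, hu, if_true, hc2]
      have hBf : List.foldl stepB (some (comp, cnt, res)) ([t, x, y] :: s)
          = List.foldl stepB
              (some (comp.map (fun c => if c = gv comp ny then gv comp nx else c), cnt2, t)) s := by
        simp only [List.foldl_cons, stepB, hcx, hcy, hc2]
        rw [if_pos hcc]
      rw [hA, hBf]
      exact ih root2 rank2 (comp.map (fun c => if c = gv comp ny then gv comp nx else c))
        cnt2 t hrows' hR2 hC2 hcnt2' hB2

-- ===== VERDICT (by name: the statement is the Claim_ definition above) =====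
theorem earliestAcq_spec : Claim_equal_earliestAcq := by
  unfold Claim_equal_earliestAcq
  intro logs n _ hpre
  unfold Spec_earliestAcq earliestAcq earliestAcq_alt
  by_cases hnil : PySem.List.sorted logs (fun k => PySem.List.pyGetD k 0 0) false = []
  · rw [hnil]
    rfl
  · have hrows : ∀ l ∈ PySem.List.sorted logs (fun k => PySem.List.pyGetD k 0 0) false,
        l.length = 3 ∧ -n ≤ l.getD 1 0 ∧ l.getD 1 0 < n ∧ -n ≤ l.getD 2 0 ∧ l.getD 2 0 < n := by
      intro l hl
      rw [PySem.List.mem_sorted] at hl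
      exact hpre l hl
    obtain ⟨l, hl⟩ := List.exists_mem_of_ne_nil _ hnil
    have hn : 1 ≤ n := by
      obtain ⟨_, h1, h2, _, _⟩ := hrows l hl
      omega
    have hRinit : RootInv n (PySem.List.pyRange 0 n 1) (List.replicate n.toNat 1) := by
      refine ⟨?_, by simp, ?_, ?_, ?_⟩
      · rw [PySem.List.length_pyRange_one]
        omega
      · intro i h0 h1
        rw [gv_pyRange n i h0 h1]
        exact ⟨h0, h1⟩
      · intro i h0 h1
        rw [gv_replicate n i h0 h1]
      · intro i h0 h1 hne
        exact absurd (gv_pyRange n i h0 h1) hne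
    have hCinit : CompLabel n (PySem.List.pyRange 0 n 1) (PySem.List.pyRange 0 n 1) := by
      refine ⟨by rw [PySem.List.length_pyRange_one]; omega, ?_, ?_⟩
      · intro i h0 h1
        simp [gv_pyRange n i h0 h1]
      · intro i j h0 h1 hj0 hj1 _ _ hcij
        rw [gv_pyRange n i h0 h1, gv_pyRange n j hj0 hj1] at hcij
        exact hcij
    have hcntinit : n = rootsCnt n (PySem.List.pyRange 0 n 1) := by
      unfold rootsCnt
      rw [List.filter_eq_self.mpr ?_]
      · rw [PySem.List.length_pyRange_one]
        omega
      · intro a ha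
        have hb := PySem.List.mem_pyRange_one.mp ha
        simp [gv_pyRange n a hb.1 hb.2]
    have hBinit : RankBound n (List.replicate n.toNat 1) n := by
      intro i h0 h1
      rw [gv_replicate n i h0 h1]
      have : rootsCnt n (PySem.List.pyRange 0 n 1) = n := hcntinit.symm
      omega
    show (match List.foldl stepA (some (PySem.List.pyRange 0 n 1, List.replicate n.toNat 1, n, 0))
            (PySem.List.sorted logs (fun k => PySem.List.pyGetD k 0 0) false) with
          | none => 0
          | some (_, _, cnt, result) => if cnt = 1 then result else -1)
        = (match List.foldl stepB (some (PySem.List.pyRange 0 n 1, n, 0))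
            (PySem.List.sorted logs (fun k => PySem.List.pyGetD k 0 0) false) with
          | none => -1
          | some (_, cnt, result) => if cnt = 1 then result else -1)
    obtain ⟨root', rank', comp', cnt', res', hA, hB'⟩ :=
      fold_rel n hn (PySem.List.sorted logs (fun k => PySem.List.pyGetD k 0 0) false)
        (PySem.List.pyRange 0 n 1) (List.replicate n.toNat 1) (PySem.List.pyRange 0 n 1)
        n 0 hrows hRinit hCinit hcntinit hBinit
    rw [hA, hB']
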